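-- pv_equiv track=rewrite | github.com/jhee514/Algorithms | SWEA_problems/1215_palin1.py | find
-- ===== SOURCE A (Python) =====
-- def find(n, table):
--     cnt = 0
--     for i in range(8):
--         for j in range(8-n+1):
--             p = table[i][j:j+n]
--             if p == p[::-1]:
--                 cnt += 1
--     for k in range(8):
--         for l in range(8-n+1):
--             p = [table[m][k] for m in range(l, l+n)]
--             if p == p[::-1]:
--                 cnt += 1
--     return cnt
-- ===== SOURCE B (Python) =====
-- def find(n, table):
--     if n > 8:
--         return 0
--     lines = [table[i][:8] for i in range(8)]
--     lines += [[table[m][k] for m in range(8)] for k in range(8)]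
--     cnt = 0
--     for line in lines:
--         for c in range(15):
--             l, r = c // 2, (c + 1) // 2
--             while l >= 0 and r < 8 and line[l] == line[r]:
--                 if r - l + 1 == n:
--                     cnt += 1
--                     break
--                 l -= 1
--                 r += 1
--     return cnt
-- ===== Notes on version B (the rewrite author's own statement) =====
-- stated objective: alternative
-- what changed: B uses the expand-around-center palindrome algorithm: for each of the 16 lines (rows truncated to 8, columns gathered once) it expands outward from each of the 15 centers comparing mirror cells until a mismatch or the border, counting the center when the growing palindrome reaches length n, instead of A's sliding a length-n window over every start position and testing slice == reversed slice.
import Mathlib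
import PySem

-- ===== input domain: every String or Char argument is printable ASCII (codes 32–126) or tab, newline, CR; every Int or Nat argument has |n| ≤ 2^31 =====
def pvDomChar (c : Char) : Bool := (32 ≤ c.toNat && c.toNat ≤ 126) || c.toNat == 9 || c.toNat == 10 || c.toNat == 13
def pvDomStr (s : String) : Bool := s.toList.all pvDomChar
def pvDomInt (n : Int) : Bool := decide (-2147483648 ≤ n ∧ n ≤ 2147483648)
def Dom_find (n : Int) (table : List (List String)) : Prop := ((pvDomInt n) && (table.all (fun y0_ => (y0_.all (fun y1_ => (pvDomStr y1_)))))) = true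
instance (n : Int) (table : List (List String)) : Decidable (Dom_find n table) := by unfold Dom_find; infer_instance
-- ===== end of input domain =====

-- B replaces A's two sliding-window scans (slice == reversed slice at every start position)
-- by the expand-around-center algorithm over the 16 pre-built lines: from each of the 15
-- centers of a line it expands outward comparing mirror cells until mismatch or border,
-- counting the center when the palindrome reaches length n (objective: alternative).

-- ===== PORT A =====
def find (n : Int) (table : List (List String)) : Int :=
  let cnt : Int := 0
  let cnt := (PySem.List.pyRange 0 8 1).foldl (fun cnt i =>
    (PySem.List.pyRange 0 (8 - n + 1) 1).foldl (fun cnt j =>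
      let p := PySem.List.slice (PySem.List.pyGetD table i []) (some j) (some (j + n))
      if p = p.reverse then cnt + 1 else cnt) cnt) cnt
  (PySem.List.pyRange 0 8 1).foldl (fun cnt k =>
    (PySem.List.pyRange 0 (8 - n + 1) 1).foldl (fun cnt l =>
      let p := (PySem.List.pyRange l (l + n) 1).map (fun m =>
        PySem.List.pyGetD (PySem.List.pyGetD table m []) k "")
      if p = p.reverse then cnt + 1 else cnt) cnt) cnt

-- ===== PORT B =====
-- B's inner while-loop: expand outward from (l, r); returns the 1/0 the loop adds to cnt
def hitCenter (line : List String) (n : Int) (l : Int) (r : Int) : Int :=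
  if h : 0 ≤ l ∧ r < 8 ∧ PySem.List.pyGetD line l "" = PySem.List.pyGetD line r "" then
    if r - l + 1 = n then 1
    else hitCenter line n (l - 1) (r + 1)
  else 0
termination_by (l + 1).toNat
decreasing_by omega

def find_alt (n : Int) (table : List (List String)) : Int :=
  if 8 < n then 0
  else
    let lines :=
      (PySem.List.pyRange 0 8 1).map (fun i =>
        PySem.List.slice (PySem.List.pyGetD table i []) none (some 8))
      ++ (PySem.List.pyRange 0 8 1).map (fun k =>
        (PySem.List.pyRange 0 8 1).map (fun m =>
          PySem.List.pyGetD (PySem.List.pyGetD table m []) k ""))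
    lines.foldl (fun cnt line =>
      (PySem.List.pyRange 0 15 1).foldl (fun cnt c =>
        cnt + hitCenter line n (PySem.Int.floordiv c 2) (PySem.Int.floordiv (c + 1) 2)) cnt) 0

-- ===== PRECONDITION & SPEC =====
-- Pre_ excludes non-positive n — a degenerate window length no one would specify: for n = 0
-- A counts every empty window as a palindrome and for n < 0 its row slices wrap around via
-- Python's negative slicing, while B, which only ever grows palindromes of length ≥ 1,
-- counts none; both corner values are artefacts. It also excludes tables with fewer than 8
-- rows, or one of the first 8 rows shorter than 8 entries, when n ≤ 8: there A raises IndexError.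
def Pre_find (n : Int) (table : List (List String)) : Prop :=
  1 ≤ n ∧ (n ≤ 8 → 8 ≤ table.length) ∧
    (n ≤ 8 → ∀ row ∈ table.take 8, 8 ≤ row.length)
instance (n : Int) (table : List (List String)) : Decidable (Pre_find n table) := by
  unfold Pre_find; infer_instance

def pvWitness_find : Int × List (List String) :=
  (2, [["a","b","b","a","c","d","d","c"],
       ["a","a","a","a","a","a","a","a"],
       ["b","c","b","c","b","c","b","c"],
       ["x","y","z","x","y","z","x","y"],
       ["a","b","b","a","c","d","d","c"],
       ["q","q","w","w","q","q","w","w"],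
       ["a","b","c","d","e","f","g","h"],
       ["h","g","f","e","d","c","b","a"]])

def Spec_find (n : Int) (table : List (List String)) (out : Int) : Prop := out = find_alt n table
instance (n : Int) (table : List (List String)) (out : Int) : Decidable (Spec_find n table out) := by
  unfold Spec_find; infer_instance

-- ===== CLAIM (what is proved, stated in full; the proofs are below) =====
def Claim_equal_find : Prop := ∀ (n : Int) (table : List (List String)),
  Dom_find n table → Pre_find n table → Spec_find n table (find n table)

-- ===== LEMMAS AND PROOFS =====

-- the shared per-window predicate both programs are reduced to:
-- the length-n window of L starting at j reads the same backwards (half-index form)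
def palB (L : List String) (n j : Int) : Bool :=
  (PySem.List.pyRange 0 (PySem.Int.floordiv n 2) 1).all (fun t =>
    PySem.List.pyGetD L (j + t) "" == PySem.List.pyGetD L (j + n - 1 - t) "")

-- half-check characterisation of "p equals its reverse"
lemma pal_iff (p : List String) :
    p = p.reverse ↔ ∀ t : Nat, t < p.length / 2 → p.getD t "" = p.getD (p.length - 1 - t) "" := by
  constructor
  · intro h t ht
    have ht' : t < p.length := by omega
    calc p.getD t "" = p.reverse.getD t "" := by rw [← h]
      _ = p.getD (p.length - 1 - t) "" := by
          rw [List.getD_eq_getElem _ "" (by simpa using ht'),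
              List.getD_eq_getElem _ "" (by omega), List.getElem_reverse]
  · intro h
    apply List.ext_getElem (by simp)
    intro i h1 h2
    rw [List.getElem_reverse,
        ← List.getD_eq_getElem p "" h1,
        ← List.getD_eq_getElem p "" (show p.length - 1 - i < p.length by omega)]
    by_cases hi : i < p.length / 2
    · exact h i hi
    · by_cases hj : p.length - 1 - i < p.length / 2
      · have hh := h _ hj
        have hidx : p.length - 1 - (p.length - 1 - i) = i := by omega
        rw [hidx] at hh
        exact hh.symm
      · have hidx : p.length - 1 - i = i := by omega
        rw [hidx]

-- the t-th element of the window starting at j is the (j+t)-th element of the line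
lemma window_get (L : List String) (hL : 8 ≤ L.length) (n j : Int)
    (hn : 0 ≤ n) (hj : 0 ≤ j) (hjn : j + n ≤ 8) (t : Nat) (ht : t < n.toNat) :
    (PySem.List.slice L (some j) (some (j + n))).getD t "" = PySem.List.pyGetD L (j + t) "" := by
  have hp : PySem.List.slice L (some j) (some (j + n)) =
      List.take n.toNat (List.drop j.toNat L) := by
    rw [PySem.List.slice_toNat L hj (by omega)]
    congr 1
    omega
  rw [hp, List.getD_eq_getElem _ ""
        (by simp only [List.length_take, List.length_drop]; omega),
      PySem.List.pyGetD_eq_getElem L "" (by omega) (by omega)]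
  simp only [List.getElem_take, List.getElem_drop]
  congr 1
  omega

-- window length
lemma window_len (L : List String) (hL : 8 ≤ L.length) (n j : Int)
    (hn : 0 ≤ n) (hj : 0 ≤ j) (hjn : j + n ≤ 8) :
    (PySem.List.slice L (some j) (some (j + n))).length = n.toNat := by
  rw [PySem.List.slice_toNat L hj (by omega)]
  simp only [List.length_take, List.length_drop]
  omega

-- window equivalence: slice-and-reverse test = the shared half-index predicate
lemma window_eq (L : List String) (hL : 8 ≤ L.length) (n j : Int)
    (hn : 0 ≤ n) (hj : 0 ≤ j) (hjn : j + n ≤ 8) :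
    decide (PySem.List.slice L (some j) (some (j + n)) =
            (PySem.List.slice L (some j) (some (j + n))).reverse)
    = palB L n j := by
  unfold palB
  apply Bool.eq_iff_iff.mpr
  rw [decide_eq_true_eq, List.all_eq_true, pal_iff,
      window_len L hL n j hn hj hjn]
  rw [PySem.Int.floordiv_eq_ediv_of_pos (by norm_num)]
  constructor
  · intro h x hx
    rw [PySem.List.mem_pyRange_one] at hx
    have ht : x.toNat < n.toNat / 2 := by omega
    have hh := h x.toNat (by omega)
    rw [window_get L hL n j hn hj hjn _ (by omega),
        window_get L hL n j hn hj hjn _ (by omega)] at hh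
    have e1 : j + (x.toNat : Int) = j + x := by omega
    have e2 : j + ((n.toNat - 1 - x.toNat : Nat) : Int) = j + n - 1 - x := by omega
    rw [e1, e2] at hh
    simpa using hh
  · intro h t ht
    have hh := h (t : Int) (by rw [PySem.List.mem_pyRange_one]; omega)
    simp only [beq_iff_eq] at hh
    rw [window_get L hL n j hn hj hjn _ (by omega),
        window_get L hL n j hn hj hjn _ (by omega)]
    have e1 : j + ((n.toNat - 1 - t : Nat) : Int) = j + n - 1 - t := by omega
    rw [e1]
    exact hh

-- A's column window is a slice of the virtual column line
lemma col_slice (f : Int → String) (l n : Int) (hn : 0 ≤ n) (hl : 0 ≤ l) (hln : l + n ≤ 8) :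
    (PySem.List.pyRange l (l + n) 1).map f =
    PySem.List.slice ((PySem.List.pyRange 0 8 1).map f) (some l) (some (l + n)) := by
  rw [PySem.List.slice_toNat _ hl (by omega)]
  apply List.ext_getElem
  · simp only [List.length_map, List.length_take, List.length_drop,
      PySem.List.length_pyRange_one]
    omega
  · intro t h1 h2
    simp only [List.getElem_map, List.getElem_take, List.getElem_drop,
      PySem.List.getElem_pyRange_one]
    congr 1
    simp only [List.length_map, PySem.List.length_pyRange_one] at h1
    omega

-- A's row test = the shared predicate; it survives truncating the row to B's row line
lemma pyGetD_take8 (L : List String) (hL : 8 ≤ L.length) (i : Int) (h0 : 0 ≤ i) (h8 : i < 8) :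
    PySem.List.pyGetD (L.take 8) i "" = PySem.List.pyGetD L i "" := by
  rw [PySem.List.pyGetD_eq_getElem _ "" h0 (by simp only [List.length_take]; omega),
      PySem.List.pyGetD_eq_getElem L "" h0 (by omega)]
  rw [List.getElem_take]

lemma palB_take (L : List String) (hL : 8 ≤ L.length) (n j : Int)
    (h1 : 1 ≤ n) (hj : 0 ≤ j) (hjn : j + n ≤ 8) :
    palB (PySem.List.slice L none (some 8)) n j = palB L n j := by
  have h8 : PySem.List.slice L none (some (8 : Int)) = L.take 8 := by
    rw [PySem.List.slice_to L (by norm_num)]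
    have e : (8 : Int).toNat = 8 := rfl
    rw [e]
  rw [h8]
  unfold palB
  apply Bool.eq_iff_iff.mpr
  rw [List.all_eq_true, List.all_eq_true]
  have key : ∀ t : Int, t ∈ PySem.List.pyRange 0 (PySem.Int.floordiv n 2) 1 →
      (PySem.List.pyGetD (L.take 8) (j + t) "" = PySem.List.pyGetD L (j + t) "" ∧
       PySem.List.pyGetD (L.take 8) (j + n - 1 - t) "" = PySem.List.pyGetD L (j + n - 1 - t) "") := by
    intro t ht
    rw [PySem.List.mem_pyRange_one, PySem.Int.floordiv_eq_ediv_of_pos (by norm_num)] at ht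
    exact ⟨pyGetD_take8 L hL _ (by omega) (by omega),
           pyGetD_take8 L hL _ (by omega) (by omega)⟩
  constructor
  · intro h t ht
    have hh := h t ht
    rw [(key t ht).1, (key t ht).2] at hh
    exact hh
  · intro h t ht
    rw [(key t ht).1, (key t ht).2]
    exact h t ht

-- A's column test = the shared predicate on B's column line
lemma col_cond_eq (f : Int → String) (n l : Int) (h1 : 1 ≤ n) (hl : 0 ≤ l) (hln : l + n ≤ 8) :
    decide ((PySem.List.pyRange l (l + n) 1).map f =
            ((PySem.List.pyRange l (l + n) 1).map f).reverse)
    = palB ((PySem.List.pyRange 0 8 1).map f) n l := by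
  have hL : 8 ≤ ((PySem.List.pyRange 0 8 1).map f).length := by
    simp only [List.length_map, PySem.List.length_pyRange_one]
    decide
  rw [col_slice f l n (by omega) hl hln, window_eq _ hL n l (by omega) hl hln]

-- the expansion loop, solved: with d expansions left, it returns 1 iff bounds hold and all
-- remaining mirror pairs agree
lemma hit_expand (d : Nat) : ∀ (L : List String) (n l r : Int), r - l + 1 + 2 * (d : Int) = n →
    hitCenter L n l r =
      if (0 ≤ l - (d : Int) ∧ r + (d : Int) < 8 ∧ ∀ k : Nat, k ≤ d →
          PySem.List.pyGetD L (l - (k : Int)) "" = PySem.List.pyGetD L (r + (k : Int)) "")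
      then 1 else 0 := by
  induction d with
  | zero =>
    intro L n l r hd
    rw [hitCenter]
    by_cases hA : 0 ≤ l ∧ r < 8 ∧ PySem.List.pyGetD L l "" = PySem.List.pyGetD L r ""
    · rw [dif_pos hA, if_pos (by omega), if_pos]
      refine ⟨by simpa using hA.1, by simpa using hA.2.1, ?_⟩
      intro k hk
      have hk0 : k = 0 := by omega
      subst hk0
      simpa using hA.2.2
    · rw [dif_neg hA, if_neg]
      rintro ⟨c1, c2, c3⟩
      have := c3 0 (by omega)
      simp only [Nat.cast_zero, sub_zero, add_zero] at c1 c2 this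
      exact hA ⟨c1, c2, this⟩
  | succ d ih =>
    intro L n l r hd
    rw [hitCenter]
    by_cases hA : 0 ≤ l ∧ r < 8 ∧ PySem.List.pyGetD L l "" = PySem.List.pyGetD L r ""
    · rw [dif_pos hA, if_neg (by push_cast at hd ⊢; omega),
          ih L n (l - 1) (r + 1) (by push_cast at hd ⊢; omega)]
      apply if_congr _ rfl rfl
      constructor
      · rintro ⟨c1, c2, c3⟩
        refine ⟨by push_cast at c1 ⊢; omega, by push_cast at c2 ⊢; omega, ?_⟩
        intro k hk
        cases k with
        | zero => simpa using hA.2.2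
        | succ k' =>
          have hh := c3 k' (by omega)
          have e1 : l - 1 - (k' : Int) = l - ((k' + 1 : Nat) : Int) := by push_cast; ring
          have e2 : r + 1 + (k' : Int) = r + ((k' + 1 : Nat) : Int) := by push_cast; ring
          rw [e1, e2] at hh
          exact hh
      · rintro ⟨c1, c2, c3⟩
        refine ⟨by push_cast at c1 ⊢; omega, by push_cast at c2 ⊢; omega, ?_⟩
        intro k hk
        have hh := c3 (k + 1) (by omega)
        have e1 : l - ((k + 1 : Nat) : Int) = l - 1 - (k : Int) := by push_cast; ring
        have e2 : r + ((k + 1 : Nat) : Int) = r + 1 + (k : Int) := by push_cast; ring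
        rw [e1, e2] at hh
        exact hh
    · rw [dif_neg hA, if_neg]
      rintro ⟨c1, c2, c3⟩
      have h0 := c3 0 (by omega)
      simp only [Nat.cast_zero, sub_zero, add_zero] at h0
      exact hA ⟨by push_cast at c1; omega, by push_cast at c2; omega, h0⟩

-- the loop never reaches length n (wrong parity or already too long): it returns 0
lemma hit_none (m : Nat) : ∀ (L : List String) (n l r : Int), (l + 1).toNat ≤ m →
    (∀ d : Nat, r - l + 1 + 2 * (d : Int) ≠ n) → hitCenter L n l r = 0 := by
  induction m with
  | zero =>
    intro L n l r hm h
    rw [hitCenter, dif_neg]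
    rintro ⟨c1, _, _⟩
    omega
  | succ m ih =>
    intro L n l r hm h
    rw [hitCenter]
    by_cases hA : 0 ≤ l ∧ r < 8 ∧ PySem.List.pyGetD L l "" = PySem.List.pyGetD L r ""
    · rw [dif_pos hA, if_neg (by have := h 0; push_cast at this; omega)]
      apply ih L n (l - 1) (r + 1) (by omega)
      intro d
      have := h (d + 1)
      push_cast at this ⊢
      omega
    · rw [dif_neg hA]

lemma hit_zero' (L : List String) (n l r : Int)
    (h : ∀ d : Nat, r - l + 1 + 2 * (d : Int) ≠ n) : hitCenter L n l r = 0 :=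
  hit_none (l + 1).toNat L n l r le_rfl h

lemma hit_oob (L : List String) (n l r : Int) (d : Nat) (hd : r - l + 1 + 2 * (d : Int) = n)
    (hb : l - (d : Int) < 0 ∨ 8 ≤ r + (d : Int)) : hitCenter L n l r = 0 := by
  rw [hit_expand d L n l r hd, if_neg]
  rintro ⟨c1, c2, _⟩
  omega

-- a center whose window exists: the expansion returns exactly the window predicate
lemma hit_at (L : List String) (n j l r : Int) (h1 : 1 ≤ n) (hj : 0 ≤ j) (hjn : j + n ≤ 8)
    (hl : l = j + (n - 1) / 2) (hr : r = j + n / 2) :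
    hitCenter L n l r = if palB L n j = true then 1 else 0 := by
  subst hl hr
  have hd : (j + n / 2) - (j + (n - 1) / 2) + 1 + 2 * ((((n - 1) / 2).toNat : Nat) : Int) = n := by
    omega
  rw [hit_expand ((n - 1) / 2).toNat L n _ _ hd]
  apply if_congr _ rfl rfl
  unfold palB
  rw [List.all_eq_true, PySem.Int.floordiv_eq_ediv_of_pos (show (0:Int) < 2 by norm_num)]
  constructor
  · rintro ⟨-, -, c3⟩
    intro t ht
    rw [PySem.List.mem_pyRange_one] at ht
    simp only [beq_iff_eq]
    have hk : ((n - 1) / 2 - t).toNat ≤ ((n - 1) / 2).toNat := by omega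
    have hh := c3 _ hk
    have e1 : j + (n - 1) / 2 - ((((n - 1) / 2 - t).toNat : Nat) : Int) = j + t := by omega
    have e2 : j + n / 2 + ((((n - 1) / 2 - t).toNat : Nat) : Int) = j + n - 1 - t := by omega
    rw [e1, e2] at hh
    exact hh
  · intro h
    refine ⟨by omega, by omega, ?_⟩
    intro k hk
    rcases eq_or_ne (j + (n - 1) / 2 - (k : Int)) (j + n / 2 + (k : Int)) with he | hne
    · rw [he]
    · have ht : (0 : Int) ≤ (n - 1) / 2 - k ∧ (n - 1) / 2 - (k : Int) < n / 2 := by omega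
      have hh := h ((n - 1) / 2 - k) (by rw [PySem.List.mem_pyRange_one]; omega)
      simp only [beq_iff_eq] at hh
      have e1 : j + ((n - 1) / 2 - (k : Int)) = j + (n - 1) / 2 - k := by ring
      have e2 : j + n - 1 - ((n - 1) / 2 - (k : Int)) = j + n / 2 + k := by omega
      rw [e1, e2] at hh
      exact hh

lemma ite_succ (P : Prop) [inst : Decidable P] (x : Int) :
    (if P then x + 1 else x) = x + (if P then 1 else 0) := by split_ifs <;> ring

-- the heart of the equivalence: on ANY line, summing B's center expansions over the
-- 15 centers counts exactly the length-n sliding windows satisfying the shared predicate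
set_option maxHeartbeats 1000000 in
lemma center_sum (L : List String) (n : Int) (h1 : 1 ≤ n) (h8 : n ≤ 8) (a : Int) :
    (PySem.List.pyRange 0 15 1).foldl (fun cnt c =>
      cnt + hitCenter L n (PySem.Int.floordiv c 2) (PySem.Int.floordiv (c + 1) 2)) a
    = (PySem.List.pyRange 0 (8 - n + 1) 1).foldl (fun cnt j =>
        if palB L n j = true then cnt + 1 else cnt) a := by
  have hr15 : PySem.List.pyRange 0 15 1 = [0,1,2,3,4,5,6,7,8,9,10,11,12,13,14] := by decide
  interval_cases n
  · -- n = 1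
    have hrm : PySem.List.pyRange 0 (8 - 1 + 1) 1 = [0,1,2,3,4,5,6,7] := by decide
    simp only [hr15, hrm, List.foldl,
      PySem.Int.floordiv_eq_ediv_of_pos (show (0:Int) < 2 by norm_num),
      Int.reduceAdd, Int.reduceDiv]
    rw [hit_at L 1 0 0 0 (by norm_num) (by norm_num) (by norm_num) (by decide) (by decide),
        hit_zero' L 1 0 1 (by intro d; omega),
        hit_at L 1 1 1 1 (by norm_num) (by norm_num) (by norm_num) (by decide) (by decide),
        hit_zero' L 1 1 2 (by intro d; omega),
        hit_at L 1 2 2 2 (by norm_num) (by norm_num) (by norm_num) (by decide) (by decide),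
        hit_zero' L 1 2 3 (by intro d; omega),
        hit_at L 1 3 3 3 (by norm_num) (by norm_num) (by norm_num) (by decide) (by decide),
        hit_zero' L 1 3 4 (by intro d; omega),
        hit_at L 1 4 4 4 (by norm_num) (by norm_num) (by norm_num) (by decide) (by decide),
        hit_zero' L 1 4 5 (by intro d; omega),
        hit_at L 1 5 5 5 (by norm_num) (by norm_num) (by norm_num) (by decide) (by decide),
        hit_zero' L 1 5 6 (by intro d; omega),
        hit_at L 1 6 6 6 (by norm_num) (by norm_num) (by norm_num) (by decide) (by decide),
        hit_zero' L 1 6 7 (by intro d; omega),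
        hit_at L 1 7 7 7 (by norm_num) (by norm_num) (by norm_num) (by decide) (by decide)]
    simp only [ite_succ]
    ring
  · -- n = 2
    have hrm : PySem.List.pyRange 0 (8 - 2 + 1) 1 = [0,1,2,3,4,5,6] := by decide
    simp only [hr15, hrm, List.foldl,
      PySem.Int.floordiv_eq_ediv_of_pos (show (0:Int) < 2 by norm_num),
      Int.reduceAdd, Int.reduceDiv]
    rw [hit_zero' L 2 0 0 (by intro d; omega),
        hit_at L 2 0 0 1 (by norm_num) (by norm_num) (by norm_num) (by decide) (by decide),
        hit_zero' L 2 1 1 (by intro d; omega),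
        hit_at L 2 1 1 2 (by norm_num) (by norm_num) (by norm_num) (by decide) (by decide),
        hit_zero' L 2 2 2 (by intro d; omega),
        hit_at L 2 2 2 3 (by norm_num) (by norm_num) (by norm_num) (by decide) (by decide),
        hit_zero' L 2 3 3 (by intro d; omega),
        hit_at L 2 3 3 4 (by norm_num) (by norm_num) (by norm_num) (by decide) (by decide),
        hit_zero' L 2 4 4 (by intro d; omega),
        hit_at L 2 4 4 5 (by norm_num) (by norm_num) (by norm_num) (by decide) (by decide),
        hit_zero' L 2 5 5 (by intro d; omega),
        hit_at L 2 5 5 6 (by norm_num) (by norm_num) (by norm_num) (by decide) (by decide),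
        hit_zero' L 2 6 6 (by intro d; omega),
        hit_at L 2 6 6 7 (by norm_num) (by norm_num) (by norm_num) (by decide) (by decide),
        hit_zero' L 2 7 7 (by intro d; omega)]
    simp only [ite_succ]
    ring
  · -- n = 3
    have hrm : PySem.List.pyRange 0 (8 - 3 + 1) 1 = [0,1,2,3,4,5] := by decide
    simp only [hr15, hrm, List.foldl,
      PySem.Int.floordiv_eq_ediv_of_pos (show (0:Int) < 2 by norm_num),
      Int.reduceAdd, Int.reduceDiv]
    rw [hit_oob L 3 0 0 1 (by decide) (by decide),
        hit_zero' L 3 0 1 (by intro d; omega),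
        hit_at L 3 0 1 1 (by norm_num) (by norm_num) (by norm_num) (by decide) (by decide),
        hit_zero' L 3 1 2 (by intro d; omega),
        hit_at L 3 1 2 2 (by norm_num) (by norm_num) (by norm_num) (by decide) (by decide),
        hit_zero' L 3 2 3 (by intro d; omega),
        hit_at L 3 2 3 3 (by norm_num) (by norm_num) (by norm_num) (by decide) (by decide),
        hit_zero' L 3 3 4 (by intro d; omega),
        hit_at L 3 3 4 4 (by norm_num) (by norm_num) (by norm_num) (by decide) (by decide),
        hit_zero' L 3 4 5 (by intro d; omega),
        hit_at L 3 4 5 5 (by norm_num) (by norm_num) (by norm_num) (by decide) (by decide),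
        hit_zero' L 3 5 6 (by intro d; omega),
        hit_at L 3 5 6 6 (by norm_num) (by norm_num) (by norm_num) (by decide) (by decide),
        hit_zero' L 3 6 7 (by intro d; omega),
        hit_oob L 3 7 7 1 (by decide) (by decide)]
    simp only [ite_succ]
    ring
  · -- n = 4
    have hrm : PySem.List.pyRange 0 (8 - 4 + 1) 1 = [0,1,2,3,4] := by decide
    simp only [hr15, hrm, List.foldl,
      PySem.Int.floordiv_eq_ediv_of_pos (show (0:Int) < 2 by norm_num),
      Int.reduceAdd, Int.reduceDiv]
    rw [hit_zero' L 4 0 0 (by intro d; omega),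
        hit_oob L 4 0 1 1 (by decide) (by decide),
        hit_zero' L 4 1 1 (by intro d; omega),
        hit_at L 4 0 1 2 (by norm_num) (by norm_num) (by norm_num) (by decide) (by decide),
        hit_zero' L 4 2 2 (by intro d; omega),
        hit_at L 4 1 2 3 (by norm_num) (by norm_num) (by norm_num) (by decide) (by decide),
        hit_zero' L 4 3 3 (by intro d; omega),
        hit_at L 4 2 3 4 (by norm_num) (by norm_num) (by norm_num) (by decide) (by decide),
        hit_zero' L 4 4 4 (by intro d; omega),
        hit_at L 4 3 4 5 (by norm_num) (by norm_num) (by norm_num) (by decide) (by decide),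
        hit_zero' L 4 5 5 (by intro d; omega),
        hit_at L 4 4 5 6 (by norm_num) (by norm_num) (by norm_num) (by decide) (by decide),
        hit_zero' L 4 6 6 (by intro d; omega),
        hit_oob L 4 6 7 1 (by decide) (by decide),
        hit_zero' L 4 7 7 (by intro d; omega)]
    simp only [ite_succ]
    ring
  · -- n = 5
    have hrm : PySem.List.pyRange 0 (8 - 5 + 1) 1 = [0,1,2,3] := by decide
    simp only [hr15, hrm, List.foldl,
      PySem.Int.floordiv_eq_ediv_of_pos (show (0:Int) < 2 by norm_num),
      Int.reduceAdd, Int.reduceDiv]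
    rw [hit_oob L 5 0 0 2 (by decide) (by decide),
        hit_zero' L 5 0 1 (by intro d; omega),
        hit_oob L 5 1 1 2 (by decide) (by decide),
        hit_zero' L 5 1 2 (by intro d; omega),
        hit_at L 5 0 2 2 (by norm_num) (by norm_num) (by norm_num) (by decide) (by decide),
        hit_zero' L 5 2 3 (by intro d; omega),
        hit_at L 5 1 3 3 (by norm_num) (by norm_num) (by norm_num) (by decide) (by decide),
        hit_zero' L 5 3 4 (by intro d; omega),
        hit_at L 5 2 4 4 (by norm_num) (by norm_num) (by norm_num) (by decide) (by decide),
        hit_zero' L 5 4 5 (by intro d; omega),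
        hit_at L 5 3 5 5 (by norm_num) (by norm_num) (by norm_num) (by decide) (by decide),
        hit_zero' L 5 5 6 (by intro d; omega),
        hit_oob L 5 6 6 2 (by decide) (by decide),
        hit_zero' L 5 6 7 (by intro d; omega),
        hit_oob L 5 7 7 2 (by decide) (by decide)]
    simp only [ite_succ]
    ring
  · -- n = 6
    have hrm : PySem.List.pyRange 0 (8 - 6 + 1) 1 = [0,1,2] := by decide
    simp only [hr15, hrm, List.foldl,
      PySem.Int.floordiv_eq_ediv_of_pos (show (0:Int) < 2 by norm_num),
      Int.reduceAdd, Int.reduceDiv]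
    rw [hit_zero' L 6 0 0 (by intro d; omega),
        hit_oob L 6 0 1 2 (by decide) (by decide),
        hit_zero' L 6 1 1 (by intro d; omega),
        hit_oob L 6 1 2 2 (by decide) (by decide),
        hit_zero' L 6 2 2 (by intro d; omega),
        hit_at L 6 0 2 3 (by norm_num) (by norm_num) (by norm_num) (by decide) (by decide),
        hit_zero' L 6 3 3 (by intro d; omega),
        hit_at L 6 1 3 4 (by norm_num) (by norm_num) (by norm_num) (by decide) (by decide),
        hit_zero' L 6 4 4 (by intro d; omega),
        hit_at L 6 2 4 5 (by norm_num) (by norm_num) (by norm_num) (by decide) (by decide),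
        hit_zero' L 6 5 5 (by intro d; omega),
        hit_oob L 6 5 6 2 (by decide) (by decide),
        hit_zero' L 6 6 6 (by intro d; omega),
        hit_oob L 6 6 7 2 (by decide) (by decide),
        hit_zero' L 6 7 7 (by intro d; omega)]
    simp only [ite_succ]
    ring
  · -- n = 7
    have hrm : PySem.List.pyRange 0 (8 - 7 + 1) 1 = [0,1] := by decide
    simp only [hr15, hrm, List.foldl,
      PySem.Int.floordiv_eq_ediv_of_pos (show (0:Int) < 2 by norm_num),
      Int.reduceAdd, Int.reduceDiv]
    rw [hit_oob L 7 0 0 3 (by decide) (by decide),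
        hit_zero' L 7 0 1 (by intro d; omega),
        hit_oob L 7 1 1 3 (by decide) (by decide),
        hit_zero' L 7 1 2 (by intro d; omega),
        hit_oob L 7 2 2 3 (by decide) (by decide),
        hit_zero' L 7 2 3 (by intro d; omega),
        hit_at L 7 0 3 3 (by norm_num) (by norm_num) (by norm_num) (by decide) (by decide),
        hit_zero' L 7 3 4 (by intro d; omega),
        hit_at L 7 1 4 4 (by norm_num) (by norm_num) (by norm_num) (by decide) (by decide),
        hit_zero' L 7 4 5 (by intro d; omega),
        hit_oob L 7 5 5 3 (by decide) (by decide),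
        hit_zero' L 7 5 6 (by intro d; omega),
        hit_oob L 7 6 6 3 (by decide) (by decide),
        hit_zero' L 7 6 7 (by intro d; omega),
        hit_oob L 7 7 7 3 (by decide) (by decide)]
    simp only [ite_succ]
    ring
  · -- n = 8
    have hrm : PySem.List.pyRange 0 (8 - 8 + 1) 1 = [0] := by decide
    simp only [hr15, hrm, List.foldl,
      PySem.Int.floordiv_eq_ediv_of_pos (show (0:Int) < 2 by norm_num),
      Int.reduceAdd, Int.reduceDiv]
    rw [hit_zero' L 8 0 0 (by intro d; omega),
        hit_oob L 8 0 1 3 (by decide) (by decide),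
        hit_zero' L 8 1 1 (by intro d; omega),
        hit_oob L 8 1 2 3 (by decide) (by decide),
        hit_zero' L 8 2 2 (by intro d; omega),
        hit_oob L 8 2 3 3 (by decide) (by decide),
        hit_zero' L 8 3 3 (by intro d; omega),
        hit_at L 8 0 3 4 (by norm_num) (by norm_num) (by norm_num) (by decide) (by decide),
        hit_zero' L 8 4 4 (by intro d; omega),
        hit_oob L 8 4 5 3 (by decide) (by decide),
        hit_zero' L 8 5 5 (by intro d; omega),
        hit_oob L 8 5 6 3 (by decide) (by decide),
        hit_zero' L 8 6 6 (by intro d; omega),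
        hit_oob L 8 6 7 3 (by decide) (by decide),
        hit_zero' L 8 7 7 (by intro d; omega)]
    simp only [ite_succ]
    ring

-- empty inner range when n > 8
lemma pyRange_nil_of_nonpos (b : Int) (hb : b ≤ 0) : PySem.List.pyRange 0 b 1 = [] := by
  have := PySem.List.length_pyRange_one (a := 0) (b := b)
  apply List.eq_nil_of_length_eq_zero
  omega

-- ===== VERDICT (by name: the statement is the Claim_ definition above) =====
theorem find_spec : Claim_equal_find := by
  intro n table _ hpre
  obtain ⟨h1, hlen, hrows⟩ := hpre
  unfold Spec_find find find_alt
  by_cases h8 : 8 < n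
  · -- n > 8: both sides are 0
    rw [if_pos h8, pyRange_nil_of_nonpos (8 - n + 1) (by omega)]
    simp [List.foldl]
  · push Not at h8
    rw [if_neg (by omega)]
    have hlen8 : 8 ≤ table.length := hlen h8
    have hrow8 : ∀ row ∈ table.take 8, 8 ≤ row.length := hrows h8
    dsimp only
    -- B side: split the 16 lines, turn each center pass into the window count
    rw [List.foldl_append, List.foldl_map, List.foldl_map]
    rw [PySem.List.foldl_congr_mem _ _
      (fun cnt i => (PySem.List.pyRange 0 (8 - n + 1) 1).foldl (fun cnt j =>
        if palB (PySem.List.slice (PySem.List.pyGetD table i []) none (some 8)) n j = true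
        then cnt + 1 else cnt) cnt) 0
      (fun acc i _ => center_sum _ n h1 h8 acc)]
    rw [PySem.List.foldl_congr_mem _ _
      (fun cnt k => (PySem.List.pyRange 0 (8 - n + 1) 1).foldl (fun cnt l =>
        if palB ((PySem.List.pyRange 0 8 1).map (fun m =>
          PySem.List.pyGetD (PySem.List.pyGetD table m []) k "")) n l = true
        then cnt + 1 else cnt) cnt) _
      (fun acc k _ => center_sum _ n h1 h8 acc)]
    -- A side: rewrite each window test into the same predicate on B's lines
    have hrowL : ∀ i : Int, i ∈ PySem.List.pyRange 0 8 1 →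
        8 ≤ (PySem.List.pyGetD table i []).length := by
      intro i hi
      have hi' := PySem.List.mem_pyRange_one.mp hi
      rw [PySem.List.pyGetD_eq_getElem table [] (by omega) (by omega)]
      apply hrow8
      have h8' : i.toNat < (table.take 8).length := by
        simp only [List.length_take]; omega
      have hgt : (table.take 8)[i.toNat]'h8' = table[i.toNat]'(by omega) := by
        simp [List.getElem_take]
      rw [← hgt]
      exact List.getElem_mem h8'
    congr 1
    · -- columns: the remaining fold functions agree pointwise
      funext cnt k
      apply PySem.List.foldl_congr_mem
      intro acc' l hl
      have hl' := PySem.List.mem_pyRange_one.mp hl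
      have hcond := col_cond_eq (fun m => PySem.List.pyGetD (PySem.List.pyGetD table m []) k "")
        n l h1 (by omega) (by omega)
      rw [← hcond]
      simp only [decide_eq_true_eq]
    · -- rows: the two initial folds agree
      apply PySem.List.foldl_congr_mem
      intro acc i hi
      apply PySem.List.foldl_congr_mem
      intro acc' j hj
      have hj' := PySem.List.mem_pyRange_one.mp hj
      have hcond := window_eq (PySem.List.pyGetD table i []) (hrowL i hi) n j
        (by omega) (by omega) (by omega)
      rw [palB_take (PySem.List.pyGetD table i []) (hrowL i hi) n j h1 (by omega) (by omega),
          ← hcond]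
      simp only [decide_eq_true_eq]
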